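-- pv_equiv track=rewrite | github.com/jacobbart298/sycococopy | benchmarks/benchmarkmethods.py | writeProtocolWithPredicates
-- ===== SOURCE A (Python) =====
-- def writeProtocolWithPredicates(depth: int, indentLevel: int, maxDepth: int, value: bool) -> str:
--     indent = "\t"
--     if depth == maxDepth and depth % 2 == 1:
--         return indentLevel*indent + f"send bool({value}) from A to B\n"
--     elif depth == maxDepth and depth % 2 == 0:
--         return indentLevel*indent + f"send bool({value}) from B to A\n"
--     else:
--         protocol = indentLevel*indent + "sequence:\n"
--         indentLevel += 1
--         if depth % 2 == 1:
--             protocol += indentLevel*indent + f"send bool({value}) from A to B\n"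
--         else:
--             protocol += indentLevel*indent + f"send bool({value}) from B to A\n"
--         protocol += indentLevel*indent + "choice:\n"
--         protocol += writeProtocolWithPredicates(depth + 1, indentLevel + 1, maxDepth, value)
--         protocol += writeProtocolWithPredicates(depth + 1, indentLevel + 1, maxDepth, not value)
--         return protocol
-- ===== SOURCE B (Python) =====
-- def writeProtocolWithPredicates(depth: int, indentLevel: int, maxDepth: int, value: bool) -> str:
--     # Iterative: explicit stack of (depth, indentLevel, value) frames, pre-order emission.
--     out = []
--     stack = [(depth, indentLevel, value)]
--     while stack:
--         d, il, v = stack.pop()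
--         side = "A to B" if d % 2 == 1 else "B to A"
--         if d == maxDepth:
--             out.append(il * "\t" + f"send bool({v}) from {side}\n")
--         else:
--             out.append(il * "\t" + "sequence:\n")
--             out.append((il + 1) * "\t" + f"send bool({v}) from {side}\n")
--             out.append((il + 1) * "\t" + "choice:\n")
--             stack.append((d + 1, il + 2, not v))
--             stack.append((d + 1, il + 2, v))
--     return "".join(out)
-- ===== Notes on version B (the rewrite author's own statement) =====
-- stated objective: alternative
-- what changed: Replaced the self-recursion with an explicit stack of (depth, indent, value) frames and an output-piece accumulator joined once at the end, reproducing the same pre-order emission without recursion.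
import Mathlib
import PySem

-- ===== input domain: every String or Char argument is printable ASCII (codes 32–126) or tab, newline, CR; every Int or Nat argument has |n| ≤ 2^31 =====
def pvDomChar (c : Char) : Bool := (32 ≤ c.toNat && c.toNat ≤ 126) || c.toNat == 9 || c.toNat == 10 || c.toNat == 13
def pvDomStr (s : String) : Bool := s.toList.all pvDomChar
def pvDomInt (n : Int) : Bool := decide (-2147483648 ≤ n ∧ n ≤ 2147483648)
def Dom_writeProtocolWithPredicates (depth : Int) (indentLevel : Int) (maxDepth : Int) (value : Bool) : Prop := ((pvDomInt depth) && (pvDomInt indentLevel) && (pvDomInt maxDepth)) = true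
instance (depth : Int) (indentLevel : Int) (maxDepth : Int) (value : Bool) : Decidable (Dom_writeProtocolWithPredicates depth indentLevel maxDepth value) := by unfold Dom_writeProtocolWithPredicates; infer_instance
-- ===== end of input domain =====

-- B replaces the self-recursion by an explicit stack of frames with an output accumulator (alternative decomposition, same output).

-- ===== PORT A =====
-- shared small helpers (exact Python semantics): n * "\t" and str(bool)
def pvTabs (n : Int) : List Char := List.replicate n.toNat '\t'
def pvBool (v : Bool) : List Char := if v then "True".toList else "False".toList

-- literal transliteration of A's recursion; the Nat fuel (= maxDepth - depth when depth ≤ maxDepth)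
-- is only a totality guard: under Pre_ the 0-fuel branch is never reached.
def wpA : Nat → Int → Int → Int → Bool → List Char
  | fuel, depth, indentLevel, maxDepth, value =>
    if depth = maxDepth ∧ PySem.Int.mod depth 2 = 1 then
      pvTabs indentLevel ++ "send bool(".toList ++ pvBool value ++ ") from A to B\n".toList
    else if depth = maxDepth ∧ PySem.Int.mod depth 2 = 0 then
      pvTabs indentLevel ++ "send bool(".toList ++ pvBool value ++ ") from B to A\n".toList
    else
      match fuel with
      | 0 => []   -- unreachable when depth ≤ maxDepth
      | fuel + 1 =>
        let protocol := pvTabs indentLevel ++ "sequence:\n".toList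
        let indentLevel := indentLevel + 1
        let protocol := protocol ++ pvTabs indentLevel ++
          (if PySem.Int.mod depth 2 = 1 then
            "send bool(".toList ++ pvBool value ++ ") from A to B\n".toList
          else
            "send bool(".toList ++ pvBool value ++ ") from B to A\n".toList)
        let protocol := protocol ++ pvTabs indentLevel ++ "choice:\n".toList
        let protocol := protocol ++ wpA fuel (depth + 1) (indentLevel + 1) maxDepth value
        protocol ++ wpA fuel (depth + 1) (indentLevel + 1) maxDepth (!value)

def writeProtocolWithPredicates (depth : Int) (indentLevel : Int) (maxDepth : Int) (value : Bool) : String :=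
  String.ofList (wpA (maxDepth - depth).toNat depth indentLevel maxDepth value)

-- ===== PORT B =====
-- number of frames the stack loop processes for a starting gap g (used as the totality fuel)
def pvNodes : Nat → Nat
  | 0 => 1
  | g + 1 => 1 + 2 * pvNodes g

-- literal transliteration of B's while loop; fuel is only a totality guard (enough for depth ≤ maxDepth).
def wpB : Nat → List (Int × Int × Bool) → List Char → Int → List Char
  | _, [], out, _ => out
  | 0, _ :: _, out, _ => out   -- unreachable when fuel = pvNodes of the starting gap
  | fuel + 1, (d, il, v) :: stack, out, maxDepth =>
    let side := if PySem.Int.mod d 2 = 1 then "A to B".toList else "B to A".toList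
    if d = maxDepth then
      wpB fuel stack
        (out ++ (pvTabs il ++ "send bool(".toList ++ pvBool v ++ ") from ".toList ++ side ++ "\n".toList)) maxDepth
    else
      wpB fuel ((d + 1, il + 2, v) :: (d + 1, il + 2, !v) :: stack)
        (out ++ (pvTabs il ++ "sequence:\n".toList)
             ++ (pvTabs (il + 1) ++ "send bool(".toList ++ pvBool v ++ ") from ".toList ++ side ++ "\n".toList)
             ++ (pvTabs (il + 1) ++ "choice:\n".toList)) maxDepth

def writeProtocolWithPredicates_alt (depth : Int) (indentLevel : Int) (maxDepth : Int) (value : Bool) : String :=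
  String.ofList (wpB (pvNodes (maxDepth - depth).toNat) [(depth, indentLevel, value)] [] maxDepth)

-- ===== PRECONDITION & SPEC =====
-- Pre_ excludes depth > maxDepth, where Python A raises RecursionError (and B never terminates).
def Pre_writeProtocolWithPredicates (depth : Int) (indentLevel : Int) (maxDepth : Int) (value : Bool) : Prop :=
  depth ≤ maxDepth
instance (depth : Int) (indentLevel : Int) (maxDepth : Int) (value : Bool) : Decidable (Pre_writeProtocolWithPredicates depth indentLevel maxDepth value) := by unfold Pre_writeProtocolWithPredicates; infer_instance
def pvWitness_writeProtocolWithPredicates : Int × Int × Int × Bool := (1, 0, 3, true)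

def Spec_writeProtocolWithPredicates (depth : Int) (indentLevel : Int) (maxDepth : Int) (value : Bool) (out : String) : Prop := out = writeProtocolWithPredicates_alt depth indentLevel maxDepth value
instance (depth : Int) (indentLevel : Int) (maxDepth : Int) (value : Bool) (out : String) : Decidable (Spec_writeProtocolWithPredicates depth indentLevel maxDepth value out) := by unfold Spec_writeProtocolWithPredicates; infer_instance

-- ===== CLAIM (what is proved, stated in full; the proofs are below) =====
def Claim_equal_writeProtocolWithPredicates : Prop := ∀ (depth : Int) (indentLevel : Int) (maxDepth : Int) (value : Bool), Dom_writeProtocolWithPredicates depth indentLevel maxDepth value → Pre_writeProtocolWithPredicates depth indentLevel maxDepth value → Spec_writeProtocolWithPredicates depth indentLevel maxDepth value (writeProtocolWithPredicates depth indentLevel maxDepth value)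

-- ===== LEMMAS AND PROOFS =====

-- one stack step consumes exactly the subtree below the popped frame
lemma wpB_key (m : Int) : ∀ (g : Nat) (d il : Int) (v : Bool)
    (stack : List (Int × Int × Bool)) (out : List Char) (fuel : Nat),
    d ≤ m → (m - d).toNat = g → pvNodes g ≤ fuel →
    wpB fuel ((d, il, v) :: stack) out m
      = wpB (fuel - pvNodes g) stack (out ++ wpA g d il m v) m := by
  intro g
  induction g with
  | zero =>
    intro d il v stack out fuel hdm hg hfuel
    have hd : d = m := by
      have : (m - d).toNat = 0 := hg
      omega
    obtain ⟨f, rfl⟩ : ∃ f, fuel = f + 1 := by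
      cases fuel with
      | zero => simp [pvNodes] at hfuel
      | succ f => exact ⟨f, rfl⟩
    subst hd
    rcases PySem.Int.mod_two_eq d with h | h <;>
    · have h2 : d % 2 = PySem.Int.mod d 2 := (PySem.Int.mod_eq_emod_of_pos (by norm_num)).symm
      rw [h] at h2
      simp [wpB, wpA, pvNodes, h, h2, Int.dvd_iff_emod_eq_zero, List.append_assoc]
  | succ g ih =>
    intro d il v stack out fuel hdm hg hfuel
    have hd : d ≠ m := by
      have : (m - d).toNat = g + 1 := hg
      omega
    obtain ⟨f, rfl⟩ : ∃ f, fuel = f + 1 := by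
      cases fuel with
      | zero => simp [pvNodes] at hfuel
      | succ f => exact ⟨f, rfl⟩
    have hfuel' : pvNodes (g + 1) ≤ f + 1 := hfuel
    have hnodes : 1 + 2 * pvNodes g ≤ f + 1 := by simpa [pvNodes] using hfuel'
    have hchild : d + 1 ≤ m := by omega
    have hgap : (m - (d + 1)).toNat = g := by omega
    have h1 : pvNodes g ≤ f := by omega
    have h2 : pvNodes g ≤ f - pvNodes g := by omega
    rcases PySem.Int.mod_two_eq d with h | h <;>
    · simp only [wpB, wpA, hd, h, if_true, if_false]
      have e2 : il + 1 + 1 = il + 2 := by ring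
      rw [e2, ih (d + 1) (il + 2) v _ _ f hchild hgap h1,
          ih (d + 1) (il + 2) (!v) _ _ (f - pvNodes g) hchild hgap h2]
      congr 1
      · simp [pvNodes]; omega
      · simp [List.append_assoc]

-- ===== VERDICT (by name: the statement is the Claim_ definition above) =====
theorem writeProtocolWithPredicates_spec : Claim_equal_writeProtocolWithPredicates := by
  intro d il m v _ hpre
  unfold Spec_writeProtocolWithPredicates writeProtocolWithPredicates writeProtocolWithPredicates_alt
  rw [wpB_key m ((m - d).toNat) d il v [] [] (pvNodes ((m - d).toNat)) hpre rfl (le_refl _)]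
  simp [wpB]
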